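-- pv_equiv track=rewrite | github.com/nowsika/noble-dataset-generator | api/auto_inject.py | parse_scenario_prefix
-- ===== SOURCE A (Python) =====
-- from typing import Any, Dict, Optional, Tuple
--
-- ALLOWED_DOMAINS = ["NAV", "SEA", "ARCH", "MUSIC", "GARDEN", "MOUNTAIN", "THEATER"]
--
-- def parse_scenario_prefix(line: str) -> Tuple[Optional[str], str]:
--     """
--     Allows scenarios like:
--       ARCH|I feel ...
--       GARDEN|"quoted..."
--     Returns (domain_or_none, scenario_text_without_prefix).
--     """
--     if not isinstance(line, str):
--         return None, str(line)
--
--     for d in ALLOWED_DOMAINS: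
--         prefix = d + "|"
--         if line.startswith(prefix):
--             return d, line[len(prefix):].lstrip()
--     return None, line
-- ===== SOURCE B (Python) =====
-- from typing import Any, Dict, Optional, Tuple
--
-- ALLOWED_DOMAINS = ["NAV", "SEA", "ARCH", "MUSIC", "GARDEN", "MOUNTAIN", "THEATER"]
-- _ALLOWED = frozenset(ALLOWED_DOMAINS)
--
-- def parse_scenario_prefix(line: str) -> Tuple[Optional[str], str]:
--     if not isinstance(line, str):
--         return None, str(line)
--     i = line.find("|")
--     if i >= 0:
--         head = line[:i]
--         if head in _ALLOWED:
--             return head, line[i + 1:].lstrip()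
--     return None, line
-- ===== Notes on version B (the rewrite author's own statement) =====
-- stated objective: idiomatic
-- what changed: Instead of scanning all seven domains and testing startswith of each domain-plus-pipe prefix for each, B locates the first pipe separator once, takes the text before it as the candidate domain and checks it against a frozenset, so the per-domain scan over the line disappears.
import Mathlib
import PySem

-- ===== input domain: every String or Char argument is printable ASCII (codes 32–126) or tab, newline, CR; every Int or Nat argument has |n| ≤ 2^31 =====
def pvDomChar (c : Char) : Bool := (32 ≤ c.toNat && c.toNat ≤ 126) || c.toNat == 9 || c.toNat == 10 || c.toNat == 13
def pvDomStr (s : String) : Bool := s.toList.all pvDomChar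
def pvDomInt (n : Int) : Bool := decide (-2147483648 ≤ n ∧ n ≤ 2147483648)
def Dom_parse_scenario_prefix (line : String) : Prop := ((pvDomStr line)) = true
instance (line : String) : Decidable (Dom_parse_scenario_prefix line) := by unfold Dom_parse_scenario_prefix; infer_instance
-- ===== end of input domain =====

-- B replaces A's per-domain startswith scan by a single search for the first pipe separator plus one set lookup (idiomatic; proved equal on all strings).

-- ===== PORT A =====
def pvAllowedDomains : List String := ["NAV", "SEA", "ARCH", "MUSIC", "GARDEN", "MOUNTAIN", "THEATER"]

-- the 'for d in ALLOWED_DOMAINS' loop of A, as structural recursion over the domain list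
def pvScanA (line : String) : List String → Option String × String
  | [] => (none, line)
  | d :: ds =>
      let pre := d ++ "|"
      if PySem.Str.startswith line pre then
        (some d, PySem.Str.lstrip (PySem.Str.slice line (some (PySem.Str.len pre)) none))
      else pvScanA line ds

def parse_scenario_prefix (line : String) : Option String × String :=
  pvScanA line pvAllowedDomains

-- ===== PORT B =====
def pvAllowedSet : PySem.Set String :=
  PySem.Set.ofList ["NAV", "SEA", "ARCH", "MUSIC", "GARDEN", "MOUNTAIN", "THEATER"]

def parse_scenario_prefix_alt (line : String) : Option String × String :=
  let i := PySem.Str.find line "|"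
  if 0 ≤ i then
    let head := PySem.Str.slice line none (some i)
    if pvAllowedSet.contains head then
      (some head, PySem.Str.lstrip (PySem.Str.slice line (some (i + 1)) none))
    else (none, line)
  else (none, line)

-- ===== PRECONDITION & SPEC =====
def Spec_parse_scenario_prefix (line : String) (out : Option String × String) : Prop := out = parse_scenario_prefix_alt line
instance (line : String) (out : Option String × String) : Decidable (Spec_parse_scenario_prefix line out) := by unfold Spec_parse_scenario_prefix; infer_instance

-- ===== CLAIM (what is proved, stated in full; the proofs are below) =====
def Claim_equal_parse_scenario_prefix : Prop := ∀ (line : String), Dom_parse_scenario_prefix line → Spec_parse_scenario_prefix line (parse_scenario_prefix line)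

-- ===== LEMMAS AND PROOFS =====

theorem pv_single_prefix_drop (cs : List Char) (c : Char) (j : ℕ) :
    [c] <+: cs.drop j ↔ cs[j]? = some c := by
  rw [← List.head?_drop]
  cases hdrop : cs.drop j with
  | nil => simp
  | cons a t =>
      constructor
      · rintro ⟨u, hu⟩
        simp at hu
        simp [hu.1]
      · intro h
        simp at h
        exact ⟨t, by simp [h]⟩

theorem pv_find_spec (cs : List Char) (h : PySem.Chars.find cs ['|'] ≠ -1) :
    0 ≤ PySem.Chars.find cs ['|'] ∧
    cs[(PySem.Chars.find cs ['|']).toNat]? = some '|' ∧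
    ∀ i : ℕ, i < (PySem.Chars.find cs ['|']).toNat → cs[i]? ≠ some '|' := by
  have h0 : PySem.Chars.findFrom cs ['|'] ((0 : ℕ) : ℤ) = PySem.Chars.find cs ['|'] := by
    rw [Nat.cast_zero]
    exact PySem.Chars.findFrom_zero cs ['|']
  have hspec := PySem.Chars.findFrom_natCast_spec cs ['|'] 0 (Nat.zero_le _) (by rw [h0]; exact h)
  rw [h0] at hspec
  obtain ⟨hle, hpre, hmin⟩ := hspec
  refine ⟨by exact_mod_cast hle, (pv_single_prefix_drop _ _ _).mp hpre, ?_⟩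
  intro i hi hget
  exact hmin i (Nat.zero_le _) hi ((pv_single_prefix_drop _ _ _).mpr hget)

-- the first '|' in cs sits right after d  ↔  d ++ "|" is a prefix of cs (for pipe-free d)
theorem pv_find_pipe_iff (cs d : List Char) (hd : '|' ∉ d) :
    (d ++ ['|']) <+: cs ↔
      PySem.Chars.find cs ['|'] = (d.length : ℤ) ∧ cs.take d.length = d := by
  constructor
  · rintro ⟨t, ht⟩
    have hne : PySem.Chars.find cs ['|'] ≠ -1 := by
      rw [Ne, PySem.Chars.find_eq_neg_one_iff, not_not]
      have h1 : ['|'] <:+: d ++ ['|'] := ⟨d, [], by simp⟩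
      have h2 : (d ++ ['|']) <:+: cs := ⟨[], t, by simpa using ht⟩
      exact h1.trans h2
    obtain ⟨h0, hget, hmin⟩ := pv_find_spec cs hne
    set f := (PySem.Chars.find cs ['|']).toNat with hf
    have hcs : cs = d ++ '|' :: t := by rw [← ht]; simp
    have hflen : f = d.length := by
      rcases lt_trichotomy f d.length with hlt | heq | hgt
      · exfalso
        rw [hcs, List.getElem?_append_left hlt] at hget
        exact hd (List.mem_of_getElem? hget)
      · exact heq
      · exfalso
        refine hmin d.length hgt ?_
        rw [hcs]
        simp
    constructor
    · omega
    · rw [hcs, List.take_left']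
      rfl
  · rintro ⟨hfind, htake⟩
    have hne : PySem.Chars.find cs ['|'] ≠ -1 := by omega
    obtain ⟨h0, hget, _⟩ := pv_find_spec cs hne
    rw [hfind] at hget
    simp only [Int.toNat_natCast] at hget
    have hlt : d.length < cs.length := (List.getElem?_eq_some_iff.mp hget).1
    refine ⟨cs.drop (d.length + 1), ?_⟩
    have hsplit : cs = cs.take d.length ++ cs[d.length] :: cs.drop (d.length + 1) := by
      conv_lhs => rw [← List.take_append_drop d.length cs]
      rw [List.drop_eq_getElem_cons hlt]
    have hc : cs[d.length] = '|' := (List.getElem?_eq_some_iff.mp hget).2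
    rw [hsplit, htake, hc]
    simp

-- A's loop is find? over the domain list
theorem pv_scanA_eq_find? (line : String) (ds : List String) :
    pvScanA line ds =
      match ds.find? (fun d => PySem.Str.startswith line (d ++ "|")) with
      | some d => (some d, PySem.Str.lstrip (PySem.Str.slice line (some (PySem.Str.len (d ++ "|"))) none))
      | none => (none, line) := by
  induction ds with
  | nil => rfl
  | cons d ds ih =>
      simp only [pvScanA, List.find?_cons]
      cases h : PySem.Str.startswith line (d ++ "|") with
      | true => rfl
      | false => exact ih

theorem pv_toList_pipe (d : String) : (d ++ "|").toList = d.toList ++ ['|'] := by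
  simp

theorem pv_domains_pipe_free : ∀ d ∈ pvAllowedDomains, '|' ∉ d.toList := by decide

theorem pv_contains_iff (s : String) : pvAllowedSet.contains s = true ↔ s ∈ pvAllowedDomains := by
  rw [PySem.Set.contains_iff]
  exact PySem.Set.mem_ofList _ _

-- ===== VERDICT (by name: the statement is the Claim_ definition above) =====
theorem parse_scenario_prefix_spec : Claim_equal_parse_scenario_prefix := by
  intro line _
  unfold Spec_parse_scenario_prefix parse_scenario_prefix
  simp only [parse_scenario_prefix_alt]
  rw [pv_scanA_eq_find?]
  have hfind : PySem.Str.find line "|" = PySem.Chars.find line.toList ['|'] := by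
    rw [PySem.Str.find_eq]
    have hp : "|".toList = ['|'] := by decide
    rw [hp]
  cases hres : pvAllowedDomains.find? (fun d => PySem.Str.startswith line (d ++ "|")) with
  | some d =>
      have hmem := List.mem_of_find?_eq_some hres
      have hsw : PySem.Str.startswith line (d ++ "|") = true := by
        simpa using List.find?_some hres
      have hdfree := pv_domains_pipe_free d hmem
      have hpref : (d.toList ++ ['|']) <+: line.toList := by
        rw [PySem.Str.startswith_eq, pv_toList_pipe] at hsw
        exact (PySem.Chars.startswith_iff _ _).mp hsw
      obtain ⟨hf, htake⟩ := (pv_find_pipe_iff _ _ hdfree).mp hpref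
      have hf' : PySem.Str.find line "|" = (d.toList.length : ℤ) := by rw [hfind, hf]
      have h0 : (0 : ℤ) ≤ PySem.Str.find line "|" := by rw [hf']; exact Int.natCast_nonneg _
      have hhead : PySem.Str.slice line none (some (PySem.Str.find line "|")) = d := by
        apply String.toList_inj.mp
        rw [PySem.Str.toList_slice, PySem.Chars.slice_eq_listSlice, hf',
          PySem.List.slice_to _ (Int.natCast_nonneg _)]
        simpa using htake
      rw [if_pos h0, hhead, if_pos ((pv_contains_iff d).mpr hmem)]
      have hlen : PySem.Str.len (d ++ "|") = PySem.Str.find line "|" + 1 := by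
        rw [PySem.Str.len_eq, pv_toList_pipe, hf']
        simp
      show (some d, PySem.Str.lstrip (PySem.Str.slice line (some (PySem.Str.len (d ++ "|"))) none)) = _
      rw [hlen]
  | none =>
      rw [List.find?_eq_none] at hres
      by_cases h0 : (0 : ℤ) ≤ PySem.Str.find line "|"
      · rw [if_pos h0]
        by_cases hcont : pvAllowedSet.contains (PySem.Str.slice line none (some (PySem.Str.find line "|"))) = true
        · exfalso
          have hmem := (pv_contains_iff _).mp hcont
          have h0' : 0 ≤ PySem.Chars.find line.toList ['|'] := by rw [← hfind]; exact h0
          have hne : PySem.Chars.find line.toList ['|'] ≠ -1 := by omega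
          obtain ⟨-, hget, -⟩ := pv_find_spec _ hne
          have hlt : (PySem.Chars.find line.toList ['|']).toNat < line.toList.length :=
            (List.getElem?_eq_some_iff.mp hget).1
          have hheadlist : (PySem.Str.slice line none (some (PySem.Str.find line "|"))).toList
              = line.toList.take (PySem.Chars.find line.toList ['|']).toNat := by
            rw [PySem.Str.toList_slice, PySem.Chars.slice_eq_listSlice, hfind,
              PySem.List.slice_to _ h0']
          have hheadlen : (PySem.Str.slice line none (some (PySem.Str.find line "|"))).toList.length
              = (PySem.Chars.find line.toList ['|']).toNat := by
            rw [hheadlist, List.length_take]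
            omega
          have hdfree := pv_domains_pipe_free _ hmem
          have hpref : ((PySem.Str.slice line none (some (PySem.Str.find line "|"))).toList ++ ['|']) <+: line.toList := by
            apply (pv_find_pipe_iff _ _ hdfree).mpr
            refine ⟨by rw [hheadlen]; omega, by rw [hheadlen, ← hheadlist]⟩
          have hsw : PySem.Str.startswith line (PySem.Str.slice line none (some (PySem.Str.find line "|")) ++ "|") = true := by
            rw [PySem.Str.startswith_eq, pv_toList_pipe]
            exact (PySem.Chars.startswith_iff _ _).mpr hpref
          exact absurd hsw (by simpa using hres _ hmem)
        · rw [if_neg hcont]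
      · rw [if_neg h0]
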